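-- pv_equiv track=rewrite | github.com/mklarz/ctf-writeups | 2020/etterretningstjenesten/cybertalent-winter/3_utfordringer/2_middels/minesweeper/client.py | calculate_next_tile
-- ===== SOURCE A (Python) =====
-- METHOD_LAST = 1
--
-- METHOD = METHOD_LAST
--
-- def has_adjacent_value(state, x, y, value):
--     """
--     a b c
--     d 0 e
--     f g h
--     """
--     adjacent_tiles = [
--         state.get(y - 1, {}).get(x - 1, None), # a
--         state.get(y - 1, {}).get(x, None), # b
--         state.get(y - 1, {}).get(x + 1, None), # c
--         state.get(y, {}).get(x - 1, None), # d
--         state.get(y, {}).get(x + 1, None), # e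
--         state.get(y + 1, {}).get(x - 1, None), # f
--         state.get(y + 1, {}).get(x, None), # g
--         state.get(y + 1, {}).get(x + 1, None), # h
--     ]
--     return value in adjacent_tiles
--
-- def calculate_next_tile(old_state, new_state):
--     # Check in new state if we have - adjentent to a change - -> 0
--     last_empty = None
--     last_tile = None
--     for y, row in old_state.items():
--         for x, value in row.items():
--             old_tile = value
--             new_tile = new_state[y][x]
--
--             # Fallback guess
--             if new_tile == "-":
--                 last_empty = (x, y)
--
--             if old_tile != new_tile and old_tile == "-" and new_tile == "0":
--                 # We have a new tile that's not a mine
--                 # Check adjacent tiles to see if we have an unknown tile,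
--                 # if so, pick this tile.
--                 if has_adjacent_value(new_state, x, y, "-"):
--                     last_tile = (x, y)
--                     if METHOD == METHOD_LAST:
--                         return last_tile
--     return last_tile if last_tile else last_empty
-- ===== SOURCE B (Python) =====
-- def has_adjacent_value(state, x, y, value):
--     adjacent_tiles = [
--         state.get(y - 1, {}).get(x - 1, None),
--         state.get(y - 1, {}).get(x, None),
--         state.get(y - 1, {}).get(x + 1, None),
--         state.get(y, {}).get(x - 1, None),
--         state.get(y, {}).get(x + 1, None),
--         state.get(y + 1, {}).get(x - 1, None),
--         state.get(y + 1, {}).get(x, None),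
--         state.get(y + 1, {}).get(x + 1, None),
--     ]
--     return value in adjacent_tiles
--
-- def calculate_next_tile(old_state, new_state):
--     # First search: the first freshly revealed safe tile ('-' -> '0')
--     # that still has an unknown neighbour.
--     for y, row in old_state.items():
--         for x, old_tile in row.items():
--             if new_state[y][x] == "0" and old_tile == "-" and has_adjacent_value(new_state, x, y, "-"):
--                 return (x, y)
--     # Fallback: the last tile that is still unknown in the new state.
--     last_empty = None
--     for y, row in old_state.items():
--         for x, _ in row.items():
--             if new_state[y][x] == "-":
--                 last_empty = (x, y)
--     return last_empty
-- ===== Notes on version B (the rewrite author's own statement) =====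
-- stated objective: simpler
-- what changed: Replaces A's single loop that threads a last_empty accumulator past an early-return hit test with two independent searches: a first-match scan for a revealed safe tile with an unknown neighbour, and only if that fails a separate last-match scan for a remaining '-' tile; the dead 'last_tile' variable and the redundant old!=new test disappear.
import Mathlib
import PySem

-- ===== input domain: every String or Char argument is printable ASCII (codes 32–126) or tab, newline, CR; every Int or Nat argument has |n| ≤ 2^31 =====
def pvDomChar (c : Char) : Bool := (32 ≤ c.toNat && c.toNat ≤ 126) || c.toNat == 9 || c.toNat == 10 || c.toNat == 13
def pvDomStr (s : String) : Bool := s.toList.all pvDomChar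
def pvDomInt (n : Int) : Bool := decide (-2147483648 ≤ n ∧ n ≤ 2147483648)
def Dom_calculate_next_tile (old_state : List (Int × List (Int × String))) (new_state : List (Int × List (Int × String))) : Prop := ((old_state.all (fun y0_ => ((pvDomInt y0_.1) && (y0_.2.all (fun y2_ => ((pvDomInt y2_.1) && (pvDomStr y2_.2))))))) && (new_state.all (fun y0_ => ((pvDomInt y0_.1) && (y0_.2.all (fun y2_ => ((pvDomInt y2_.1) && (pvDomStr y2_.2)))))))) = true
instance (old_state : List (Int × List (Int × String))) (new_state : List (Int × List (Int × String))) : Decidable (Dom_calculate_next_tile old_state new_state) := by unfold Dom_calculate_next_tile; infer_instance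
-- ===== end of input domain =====

-- B replaces A's single accumulator-threading loop by two independent searches
-- (first qualifying hit, else last remaining '-') — objective: simpler.
-- Equivalence is about the return value; neither program mutates its arguments.

-- ===== PORT A =====
-- state.get(y, {}).get(x, None)  (dict lookup = first match in the association list)
def pvAdjGet (ns : List (Int × List (Int × String))) (y x : Int) : Option String :=
  ((ns.lookup y).getD []).lookup x

-- has_adjacent_value: the helper of both Source A and Source B, transcribed literally
def pvHasAdj (ns : List (Int × List (Int × String))) (x y : Int) (v : String) : Bool :=
  ([pvAdjGet ns (y-1) (x-1), pvAdjGet ns (y-1) x, pvAdjGet ns (y-1) (x+1),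
    pvAdjGet ns y (x-1), pvAdjGet ns y (x+1),
    pvAdjGet ns (y+1) (x-1), pvAdjGet ns (y+1) x, pvAdjGet ns (y+1) (x+1)]).contains (some v)

-- new_state[y][x]; under Pre_ both lookups succeed wherever this is evaluated,
-- so the "" default is never produced
def pvTileAt (ns : List (Int × List (Int × String))) (y x : Int) : String :=
  (((ns.lookup y).getD []).lookup x).getD ""

-- A's inner loop over one row: Sum.inl r = early 'return r', Sum.inr le = fell through
-- with last_empty = le
def pvARow (ns : List (Int × List (Int × String))) (y : Int)
    (row : List (Int × String)) (le : Option (Int × Int)) :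
    Sum (Int × Int) (Option (Int × Int)) :=
  match row with
  | [] => Sum.inr le
  | (x, old) :: rest =>
    let nt := pvTileAt ns y x
    let le' := if nt = "-" then some (x, y) else le
    if old ≠ nt ∧ old = "-" ∧ nt = "0" then
      if pvHasAdj ns x y "-" then Sum.inl (x, y)
      else pvARow ns y rest le'
    else pvARow ns y rest le'

def pvARows (ns : List (Int × List (Int × String)))
    (rows : List (Int × List (Int × String))) (le : Option (Int × Int)) :
    Sum (Int × Int) (Option (Int × Int)) :=
  match rows with
  | [] => Sum.inr le
  | (y, row) :: rest =>
    match pvARow ns y row le with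
    | Sum.inl r => Sum.inl r
    | Sum.inr le' => pvARows ns rest le'

def calculate_next_tile (old_state : List (Int × List (Int × String))) (new_state : List (Int × List (Int × String))) : Option (Int × Int) :=
  match pvARows new_state old_state none with
  | Sum.inl r => some r
  -- loop ended: last_tile is still None, so 'last_tile if last_tile else last_empty' is last_empty
  | Sum.inr le => le

-- ===== PORT B =====
-- first pass: first tile with new '0', old '-' and an unknown neighbour
def pvBFindRow (ns : List (Int × List (Int × String))) (y : Int)
    (row : List (Int × String)) : Option (Int × Int) :=
  match row with
  | [] => none
  | (x, old) :: rest =>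
    if pvTileAt ns y x = "0" ∧ old = "-" ∧ pvHasAdj ns x y "-" then some (x, y)
    else pvBFindRow ns y rest

def pvBFind (ns : List (Int × List (Int × String)))
    (rows : List (Int × List (Int × String))) : Option (Int × Int) :=
  match rows with
  | [] => none
  | (y, row) :: rest =>
    match pvBFindRow ns y row with
    | some r => some r
    | none => pvBFind ns rest

-- second pass: the last tile still '-' in the new state
def pvBLast (ns : List (Int × List (Int × String)))
    (rows : List (Int × List (Int × String))) : Option (Int × Int) :=
  rows.foldl
    (fun le p => p.2.foldl
      (fun le q => if pvTileAt ns p.1 q.1 = "-" then some (q.1, p.1) else le) le)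
    none

def calculate_next_tile_alt (old_state : List (Int × List (Int × String))) (new_state : List (Int × List (Int × String))) : Option (Int × Int) :=
  match pvBFind new_state old_state with
  | some r => some r
  | none => pvBLast new_state old_state

-- ===== PRECONDITION & SPEC =====
-- old_state's tiles flattened in iteration order, as (y, x, old_value)
def pvTiles (old_state : List (Int × List (Int × String))) : List (Int × Int × String) :=
  old_state.flatMap (fun p => p.2.map (fun q => (p.1, q.1, q.2)))

-- new_state[y][x] exists (the lookup A and B perform on every tile they visit)
def pvPresent (ns : List (Int × List (Int × String))) (t : Int × Int × String) : Bool :=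
  (((ns.lookup t.1).getD []).lookup t.2.1).isSome

-- a qualifying tile: old '-', new '0', with an unknown neighbour (A and B return here)
def pvQual (ns : List (Int × List (Int × String))) (t : Int × Int × String) : Bool :=
  t.2.2 == "-" && pvTileAt ns t.1 t.2.1 == "0" && pvHasAdj ns t.2.1 t.1 "-"

-- Pre_ excludes exactly the inputs on which A (and B) raise KeyError: those where,
-- scanning old_state's tiles in iteration order, some tile strictly before the first
-- qualifying one has no entry in new_state. Every input on which A returns satisfies Pre_.
def Pre_calculate_next_tile (old_state : List (Int × List (Int × String))) (new_state : List (Int × List (Int × String))) : Prop :=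
  ∀ i < (pvTiles old_state).length,
    (∀ j < i, pvQual new_state ((pvTiles old_state).getD j (0, 0, "")) = false) →
    pvPresent new_state ((pvTiles old_state).getD i (0, 0, "")) = true
instance (old_state : List (Int × List (Int × String))) (new_state : List (Int × List (Int × String))) : Decidable (Pre_calculate_next_tile old_state new_state) := by unfold Pre_calculate_next_tile; infer_instance

def pvWitness_calculate_next_tile : (List (Int × List (Int × String))) × (List (Int × List (Int × String))) :=
  ([(0, [(0, "-"), (1, "-")])], [(0, [(0, "0"), (1, "-")])])

def Spec_calculate_next_tile (old_state : List (Int × List (Int × String))) (new_state : List (Int × List (Int × String))) (out : Option (Int × Int)) : Prop := out = calculate_next_tile_alt old_state new_state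
instance (old_state : List (Int × List (Int × String))) (new_state : List (Int × List (Int × String))) (out : Option (Int × Int)) : Decidable (Spec_calculate_next_tile old_state new_state out) := by unfold Spec_calculate_next_tile; infer_instance

-- ===== CLAIM (what is proved, stated in full; the proofs are below) =====
def Claim_equal_calculate_next_tile : Prop := ∀ (old_state : List (Int × List (Int × String))) (new_state : List (Int × List (Int × String))), Dom_calculate_next_tile old_state new_state → Pre_calculate_next_tile old_state new_state → Spec_calculate_next_tile old_state new_state (calculate_next_tile old_state new_state)

-- ===== LEMMAS AND PROOFS =====

theorem pvRow_eq (ns : List (Int × List (Int × String))) (y : Int)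
    (row : List (Int × String)) (le : Option (Int × Int)) :
    pvARow ns y row le =
      match pvBFindRow ns y row with
      | some r => Sum.inl r
      | none => Sum.inr (row.foldl
          (fun le q => if pvTileAt ns y q.1 = "-" then some (q.1, y) else le) le) := by
  induction row generalizing le with
  | nil => simp [pvARow, pvBFindRow]
  | cons hd tl ih =>
    obtain ⟨x, old⟩ := hd
    by_cases hOld : old = "-"
    · by_cases hNt : pvTileAt ns y x = "0"
      · by_cases hAdj : pvHasAdj ns x y "-" = true
        · simp [pvARow, pvBFindRow, hOld, hNt, hAdj]
        · simp [pvARow, pvBFindRow, hOld, hNt, hAdj, ih]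
      · simp [pvARow, pvBFindRow, hOld, hNt, ih]
    · simp [pvARow, pvBFindRow, hOld, ih]

theorem pvRows_eq (ns : List (Int × List (Int × String)))
    (rows : List (Int × List (Int × String))) (le : Option (Int × Int)) :
    pvARows ns rows le =
      match pvBFind ns rows with
      | some r => Sum.inl r
      | none => Sum.inr (rows.foldl
          (fun le p => p.2.foldl
            (fun le q => if pvTileAt ns p.1 q.1 = "-" then some (q.1, p.1) else le) le) le) := by
  induction rows generalizing le with
  | nil => simp [pvARows, pvBFind]
  | cons hd tl ih =>
    obtain ⟨y, row⟩ := hd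
    simp only [pvARows, pvBFind, pvRow_eq, List.foldl_cons]
    cases pvBFindRow ns y row with
    | some r => rfl
    | none => simp [ih]

-- ===== VERDICT (by name: the statement is the Claim_ definition above) =====
theorem calculate_next_tile_spec : Claim_equal_calculate_next_tile := by
  intro old_state new_state _ _
  unfold Spec_calculate_next_tile calculate_next_tile calculate_next_tile_alt pvBLast
  rw [pvRows_eq]
  cases pvBFind new_state old_state <;> rfl
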